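-- pv_equiv track=rewrite | github.com/wenboyaoo/dinov3-yolos-detection | datasets/coco_stats.py | _infer_patch_size_from_hw_and_num_patches
-- ===== SOURCE A (Python) =====
-- from typing import Optional
--
-- def _infer_patch_size_from_hw_and_num_patches(img_h: int, img_w: int, num_patches: int) -> Optional[int]:
--     if img_h <= 0 or img_w <= 0 or num_patches <= 0:
--         return None
--     common_divs = [d for d in range(1, min(img_h, img_w) + 1) if (img_h % d == 0 and img_w % d == 0)]
--     preferred = [16, 14, 8, 32]
--     patch_size_candidates = [d for d in preferred if d in common_divs] + [d for d in common_divs if d not in preferred]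
--     for ps in patch_size_candidates:
--         hp = img_h // ps
--         wp = img_w // ps
--         if hp * wp == num_patches:
--             return int(ps)
--     return None
-- ===== SOURCE B (Python) =====
-- from math import isqrt
-- from typing import Optional
--
-- def _infer_patch_size_from_hw_and_num_patches(img_h: int, img_w: int, num_patches: int) -> Optional[int]:
--     # Any valid patch size ps satisfies ps*ps*num_patches == img_h*img_w, so it is
--     # uniquely determined: compute it directly via an integer square root.
--     if img_h <= 0 or img_w <= 0 or num_patches <= 0:
--         return None
--     area = img_h * img_w
--     if area % num_patches != 0:
--         return None
--     s = isqrt(area // num_patches)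
--     if s == 0 or s * s * num_patches != area:
--         return None
--     if img_h % s == 0 and img_w % s == 0:
--         return s
--     return None
-- ===== Notes on version B (the rewrite author's own statement) =====
-- stated objective: faster
-- what changed: B replaces A's scan over all d in 1..min(h,w) (building common divisors and a preference-ordered candidate list) with a closed-form computation: any valid patch size ps satisfies ps*ps*num_patches == img_h*img_w, so it is unique and obtained directly with one integer square root plus divisibility checks.
import Mathlib
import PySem

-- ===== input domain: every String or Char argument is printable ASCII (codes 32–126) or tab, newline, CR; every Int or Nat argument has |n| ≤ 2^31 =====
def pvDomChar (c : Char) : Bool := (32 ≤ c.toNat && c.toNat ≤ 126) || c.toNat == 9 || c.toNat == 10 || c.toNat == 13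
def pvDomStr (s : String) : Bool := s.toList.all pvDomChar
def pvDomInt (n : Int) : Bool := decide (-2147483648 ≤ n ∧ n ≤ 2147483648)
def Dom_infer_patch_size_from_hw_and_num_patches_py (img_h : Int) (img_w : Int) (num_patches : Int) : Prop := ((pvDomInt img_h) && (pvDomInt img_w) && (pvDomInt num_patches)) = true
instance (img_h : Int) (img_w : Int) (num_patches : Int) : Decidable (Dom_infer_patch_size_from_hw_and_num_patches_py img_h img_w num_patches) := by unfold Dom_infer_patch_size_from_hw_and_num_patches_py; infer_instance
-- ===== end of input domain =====

-- B is faster: any valid patch size ps satisfies ps*ps*num_patches = img_h*img_w, so B computes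
-- the unique candidate with one integer square root instead of A's scan over 1..min(img_h,img_w).

-- ===== PORT A =====
-- the 'for ps in patch_size_candidates' loop of A
def pvLoopA (img_h : Int) (img_w : Int) (num_patches : Int) : List Int → Option Int
  | [] => none
  | ps :: rest =>
    if PySem.Int.floordiv img_h ps * PySem.Int.floordiv img_w ps = num_patches then some ps
    else pvLoopA img_h img_w num_patches rest

def infer_patch_size_from_hw_and_num_patches_py (img_h : Int) (img_w : Int) (num_patches : Int) : Option Int :=
  if img_h ≤ 0 ∨ img_w ≤ 0 ∨ num_patches ≤ 0 then none
  else
    let common_divs := (PySem.List.pyRange 1 (min img_h img_w + 1) 1).filter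
      (fun d => decide (PySem.Int.mod img_h d = 0 ∧ PySem.Int.mod img_w d = 0))
    let preferred : List Int := [16, 14, 8, 32]
    let patch_size_candidates :=
      preferred.filter (fun d => common_divs.contains d)
        ++ common_divs.filter (fun d => !(preferred.contains d))
    pvLoopA img_h img_w num_patches patch_size_candidates

-- ===== PORT B =====
def infer_patch_size_from_hw_and_num_patches_py_alt (img_h : Int) (img_w : Int) (num_patches : Int) : Option Int :=
  if img_h ≤ 0 ∨ img_w ≤ 0 ∨ num_patches ≤ 0 then none
  else
    let area := img_h * img_w
    if PySem.Int.mod area num_patches ≠ 0 then none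
    else
      -- math.isqrt on a nonnegative int = Nat.sqrt
      let s : Int := ((PySem.Int.floordiv area num_patches).toNat.sqrt : Int)
      if s = 0 ∨ s * s * num_patches ≠ area then none
      else if PySem.Int.mod img_h s = 0 ∧ PySem.Int.mod img_w s = 0 then some s
      else none

-- ===== PRECONDITION & SPEC =====
def Spec_infer_patch_size_from_hw_and_num_patches_py (img_h : Int) (img_w : Int) (num_patches : Int) (out : Option Int) : Prop := out = infer_patch_size_from_hw_and_num_patches_py_alt img_h img_w num_patches
instance (img_h : Int) (img_w : Int) (num_patches : Int) (out : Option Int) : Decidable (Spec_infer_patch_size_from_hw_and_num_patches_py img_h img_w num_patches out) := by unfold Spec_infer_patch_size_from_hw_and_num_patches_py; infer_instance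

-- ===== CLAIM (what is proved, stated in full; the proofs are below) =====
def Claim_equal_infer_patch_size_from_hw_and_num_patches_py : Prop := ∀ (img_h : Int) (img_w : Int) (num_patches : Int), Dom_infer_patch_size_from_hw_and_num_patches_py img_h img_w num_patches → Spec_infer_patch_size_from_hw_and_num_patches_py img_h img_w num_patches (infer_patch_size_from_hw_and_num_patches_py img_h img_w num_patches)

-- ===== LEMMAS AND PROOFS =====

-- A's loop returns none iff no candidate matches
lemma pvLoopA_eq_none_iff (h w np : Int) (l : List Int) :
    pvLoopA h w np l = none ↔
      ∀ d ∈ l, PySem.Int.floordiv h d * PySem.Int.floordiv w d ≠ np := by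
  induction l with
  | nil => simp [pvLoopA]
  | cons a t ih =>
    simp only [pvLoopA]
    split_ifs with ha
    · simp [ha]
    · simp [ih, ha]

-- A's loop returns members that match
lemma pvLoopA_eq_some (h w np : Int) (l : List Int) (x : Int)
    (hx : pvLoopA h w np l = some x) :
    x ∈ l ∧ PySem.Int.floordiv h x * PySem.Int.floordiv w x = np := by
  induction l with
  | nil => simp [pvLoopA] at hx
  | cons a t ih =>
    simp only [pvLoopA] at hx
    split_ifs at hx with ha
    · cases hx; exact ⟨List.mem_cons_self, ha⟩
    · obtain ⟨hm, hp⟩ := ih hx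
      exact ⟨List.mem_cons_of_mem _ hm, hp⟩

-- the match condition on a common divisor d is exactly d*d*np = h*w
lemma pvPred_iff (h w np d : Int) (hd : 0 < d) (hdh : d ∣ h) (hdw : d ∣ w) :
    PySem.Int.floordiv h d * PySem.Int.floordiv w d = np ↔ d * d * np = h * w := by
  rw [PySem.Int.floordiv_eq_ediv_of_pos hd, PySem.Int.floordiv_eq_ediv_of_pos hd]
  obtain ⟨a, rfl⟩ := hdh
  obtain ⟨b, rfl⟩ := hdw
  rw [Int.mul_ediv_cancel_left _ hd.ne', Int.mul_ediv_cancel_left _ hd.ne']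
  constructor
  · rintro rfl; ring
  · intro hE
    have hdd : (0 : Int) < d * d := by positivity
    have : d * d * np = d * d * (a * b) := by linarith [hE]; 
    have := mul_left_cancel₀ hdd.ne' this
    omega

-- membership in A's common_divs list
lemma pvMem_common (h w d : Int) (hh : 0 < h) (hw : 0 < w) :
    (d ∈ (PySem.List.pyRange 1 (min h w + 1) 1).filter
        (fun d => decide (PySem.Int.mod h d = 0 ∧ PySem.Int.mod w d = 0)))
      ↔ 0 < d ∧ d ∣ h ∧ d ∣ w := by
  simp only [List.mem_filter, PySem.List.mem_pyRange_one, decide_eq_true_eq,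
    PySem.Int.mod_eq_zero_iff_dvd]
  constructor
  · rintro ⟨⟨h1, _⟩, h2, h3⟩; exact ⟨by omega, h2, h3⟩
  · rintro ⟨h1, h2, h3⟩
    refine ⟨⟨by omega, ?_⟩, h2, h3⟩
    have := Int.le_of_dvd hh h2
    have := Int.le_of_dvd hw h3
    omega

-- membership in A's candidate list = membership in common_divs
lemma pvMem_cand (C : List Int) (d : Int) :
    (d ∈ ([16, 14, 8, 32] : List Int).filter (fun d => C.contains d)
          ++ C.filter (fun d => !(([16, 14, 8, 32] : List Int).contains d)))
      ↔ d ∈ C := by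
  simp only [List.mem_append, List.mem_filter, List.contains_iff_mem, Bool.not_eq_eq_eq_not,
    Bool.not_true]
  constructor
  · rintro (⟨_, h2⟩ | ⟨h1, _⟩) <;> assumption
  · intro hdC
    by_cases hp : d ∈ ([16, 14, 8, 32] : List Int)
    · exact Or.inl ⟨hp, hdC⟩
    · exact Or.inr ⟨hdC, Bool.eq_false_iff.mpr (fun hc => hp (List.contains_iff_mem.mp hc))⟩

-- uniqueness of the matching patch size
lemma pvUnique (h w np d e : Int) (hnp : 0 < np) (hd : 0 < d) (he : 0 < e)
    (h1 : d * d * np = h * w) (h2 : e * e * np = h * w) : d = e := by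
  have h3 : d * d = e * e := mul_right_cancel₀ hnp.ne' (by linarith)
  have h4 : (d - e) * (d + e) = 0 := by nlinarith
  rcases mul_eq_zero.mp h4 with h5 | h5 <;> omega

-- main equivalence on positive inputs
lemma pvMain (h w np : Int) (hh : 0 < h) (hw : 0 < w) (hnp : 0 < np) :
    infer_patch_size_from_hw_and_num_patches_py h w np
      = infer_patch_size_from_hw_and_num_patches_py_alt h w np := by
  have hg : ¬(h ≤ 0 ∨ w ≤ 0 ∨ np ≤ 0) := by omega
  set C := (PySem.List.pyRange 1 (min h w + 1) 1).filter
      (fun d => decide (PySem.Int.mod h d = 0 ∧ PySem.Int.mod w d = 0)) with hC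
  set cand := ([16, 14, 8, 32] : List Int).filter (fun d => C.contains d)
      ++ C.filter (fun d => !(([16, 14, 8, 32] : List Int).contains d)) with hcand
  have hA : infer_patch_size_from_hw_and_num_patches_py h w np = pvLoopA h w np cand := by
    simp only [infer_patch_size_from_hw_and_num_patches_py, if_neg hg, hcand, hC]
  rw [hA]
  by_cases hex : ∃ d ∈ cand, PySem.Int.floordiv h d * PySem.Int.floordiv w d = np
  · -- a match exists: both return the unique d with d*d*np = h*w
    obtain ⟨d, hdm, hdp⟩ := hex
    have hdC : d ∈ C := (pvMem_cand C d).mp hdm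
    obtain ⟨hd0, hdh, hdw⟩ := (pvMem_common h w d hh hw).mp hdC
    have hdd : d * d * np = h * w := (pvPred_iff h w np d hd0 hdh hdw).mp hdp
    -- B returns some d
    have hmod : PySem.Int.mod (h * w) np = 0 := by
      rw [PySem.Int.mod_eq_zero_iff_dvd]; exact ⟨d * d, by linarith⟩
    have hdiv : PySem.Int.floordiv (h * w) np = d * d := by
      rw [PySem.Int.floordiv_eq_ediv_of_pos hnp, ← hdd, mul_comm (d * d) np,
        Int.mul_ediv_cancel_left _ hnp.ne']
    have hs : ((PySem.Int.floordiv (h * w) np).toNat.sqrt : Int) = d := by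
      rw [hdiv]
      have hdn : d = (d.toNat : Int) := (Int.toNat_of_nonneg hd0.le).symm
      rw [hdn, ← Nat.cast_mul, Int.toNat_natCast, ← pow_two, Nat.sqrt_eq']
    have hB : infer_patch_size_from_hw_and_num_patches_py_alt h w np = some d := by
      simp only [infer_patch_size_from_hw_and_num_patches_py_alt, if_neg hg, hs]
      rw [if_neg (by simp [hmod]), if_neg, if_pos]
      · exact ⟨(PySem.Int.mod_eq_zero_iff_dvd h d).mpr hdh,
          (PySem.Int.mod_eq_zero_iff_dvd w d).mpr hdw⟩
      · push_neg; exact ⟨hd0.ne', hdd⟩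
    rw [hB]
    -- A's loop returns some y, and y = d by uniqueness
    cases hL : pvLoopA h w np cand with
    | none =>
      rw [pvLoopA_eq_none_iff] at hL
      exact absurd hdp (hL d hdm)
    | some y =>
      obtain ⟨hym, hyp⟩ := pvLoopA_eq_some h w np cand y hL
      have hyC : y ∈ C := (pvMem_cand C y).mp hym
      obtain ⟨hy0, hyh, hyw⟩ := (pvMem_common h w y hh hw).mp hyC
      have hyy : y * y * np = h * w := (pvPred_iff h w np y hy0 hyh hyw).mp hyp
      rw [pvUnique h w np y d hnp hy0 hd0 hyy hdd]
  · -- no match: both return none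
    push Not at hex
    have hA0 : pvLoopA h w np cand = none := (pvLoopA_eq_none_iff h w np cand).mpr hex
    rw [hA0]
    -- if B returned some s, s would be a match in cand; so B returns none
    have hB : infer_patch_size_from_hw_and_num_patches_py_alt h w np = none := by
      simp only [infer_patch_size_from_hw_and_num_patches_py_alt, if_neg hg]
      split_ifs with h1 h2 h3
      · rfl
      · rfl
      · exfalso
        push Not at h2
        obtain ⟨hs0, hss⟩ := h2
        obtain ⟨hsh, hsw⟩ := h3
        set s : Int := ((PySem.Int.floordiv (h * w) np).toNat.sqrt : Int) with hsdef
        have hspos : 0 < s := by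
          rcases lt_or_eq_of_le (Int.natCast_nonneg _ : (0:Int) ≤ s) with h' | h'
          · exact h'
          · exact absurd h'.symm hs0
        have hsm : s ∈ cand := (pvMem_cand C s).mpr ((pvMem_common h w s hh hw).mpr
          ⟨hspos, (PySem.Int.mod_eq_zero_iff_dvd h s).mp hsh,
            (PySem.Int.mod_eq_zero_iff_dvd w s).mp hsw⟩)
        exact hex s hsm ((pvPred_iff h w np s hspos
          ((PySem.Int.mod_eq_zero_iff_dvd h s).mp hsh)
          ((PySem.Int.mod_eq_zero_iff_dvd w s).mp hsw)).mpr hss)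
      · rfl
    rw [hB]

-- ===== VERDICT (by name: the statement is the Claim_ definition above) =====
theorem infer_patch_size_from_hw_and_num_patches_py_spec : Claim_equal_infer_patch_size_from_hw_and_num_patches_py := by
  intro h w np _
  unfold Spec_infer_patch_size_from_hw_and_num_patches_py
  by_cases hg : h ≤ 0 ∨ w ≤ 0 ∨ np ≤ 0
  · simp [infer_patch_size_from_hw_and_num_patches_py,
      infer_patch_size_from_hw_and_num_patches_py_alt, hg]
  · push Not at hg
    exact pvMain h w np (by omega) (by omega) (by omega)
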